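-- pv_equiv track=rewrite | github.com/5cos5/MA4079-Final_Year_Project | Code/ALNS/model_check.py | trip_split
-- ===== SOURCE A (Python) =====
-- def trip_split(route):
--     trip =[]
--     try:
--         temp = [route[0]]
--     except:
--         temp = []
--     for i in range(1, len(route)):
--         temp.append(route[i])
--         if route[i] == 0:
--             trip.append(temp)
--             temp = [0]
--     return trip
-- ===== SOURCE B (Python) =====
-- def trip_split(route):
--     # boundary pass: collect zero positions, then slice between them
--     zeros = [i for i in range(1, len(route)) if route[i] == 0]
--     trips = []
--     prev = 0
--     for z in zeros:
--         trips.append(list(route[prev:z + 1]))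
--         prev = z
--     return trips
-- ===== Notes on version B (the rewrite author's own statement) =====
-- stated objective: alternative
-- what changed: Replaces the single-pass buffer accumulation with a two-phase decomposition: first collect all zero positions (index >= 1), then emit one slice route[prev:z+1] per boundary with a moving start index.
import Mathlib
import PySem

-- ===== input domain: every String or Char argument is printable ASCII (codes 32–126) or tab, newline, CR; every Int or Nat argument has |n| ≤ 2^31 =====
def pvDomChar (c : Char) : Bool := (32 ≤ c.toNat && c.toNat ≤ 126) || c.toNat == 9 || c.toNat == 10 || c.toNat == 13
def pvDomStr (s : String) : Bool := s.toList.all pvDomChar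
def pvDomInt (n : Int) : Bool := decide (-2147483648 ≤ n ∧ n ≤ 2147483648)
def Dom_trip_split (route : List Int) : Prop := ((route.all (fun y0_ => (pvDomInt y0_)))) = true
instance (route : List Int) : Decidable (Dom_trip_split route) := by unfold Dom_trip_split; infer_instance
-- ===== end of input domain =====

-- B differs from A by a different decomposition (boundary pass + slicing), not by speed.

-- ===== PORT A =====
-- loop body of A's for-loop: append route[i] to temp; if it is 0, flush temp and restart from [0]
def tripStepA (route : List Int) (st : List (List Int) × List Int) (i : Int) :
    List (List Int) × List Int :=
  let temp := st.2 ++ [PySem.List.pyGetD route i 0]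
  if PySem.List.pyGetD route i 0 = 0 then (st.1 ++ [temp], [0]) else (st.1, temp)

def trip_split (route : List Int) : List (List Int) :=
  -- try: temp = [route[0]] except: temp = []
  let temp0 : List Int :=
    match PySem.List.pyGet? route 0 with
    | some x => [x]
    | none => []
  let s := (PySem.List.pyRange 1 (route.length : Int) 1).foldl (tripStepA route) ([], temp0)
  s.1

-- ===== PORT B =====
-- loop body of B's for-loop over the zero positions: emit route[prev:z+1], move prev to z
def tripStepB (route : List Int) (st : Int × List (List Int)) (z : Int) :
    Int × List (List Int) :=
  (z, st.2 ++ [PySem.List.slice route (some st.1) (some (z + 1))])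

def trip_split_alt (route : List Int) : List (List Int) :=
  let zeros := (PySem.List.pyRange 1 (route.length : Int) 1).filter
    (fun i => PySem.List.pyGetD route i 0 == 0)
  let s := zeros.foldl (tripStepB route) (0, [])
  s.2

-- ===== PRECONDITION & SPEC =====
def Spec_trip_split (route : List Int) (out : List (List Int)) : Prop := out = trip_split_alt route
instance (route : List Int) (out : List (List Int)) : Decidable (Spec_trip_split route out) := by unfold Spec_trip_split; infer_instance

-- ===== CLAIM (what is proved, stated in full; the proofs are below) =====
def Claim_equal_trip_split : Prop := ∀ (route : List Int), Dom_trip_split route → Spec_trip_split route (trip_split route)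

-- ===== LEMMAS AND PROOFS =====

-- Invariant relating A's (trip, temp) after indices 1..n-1 to B's (prev, out) over zeros < n.
lemma trip_split_inv (route : List Int) (hne : route ≠ []) :
    ∀ n : Nat, 1 ≤ n → n ≤ route.length →
    ∃ p : Nat, p < n ∧
      ((PySem.List.pyRange 1 (n : Int) 1).foldl (tripStepA route) ([], [route.getD 0 0])).1
        = (((PySem.List.pyRange 1 (n : Int) 1).filter
            (fun i => PySem.List.pyGetD route i 0 == 0)).foldl (tripStepB route) (0, [])).2
      ∧ (((PySem.List.pyRange 1 (n : Int) 1).filter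
            (fun i => PySem.List.pyGetD route i 0 == 0)).foldl (tripStepB route) (0, [])).1 = (p : Int)
      ∧ ((PySem.List.pyRange 1 (n : Int) 1).foldl (tripStepA route) ([], [route.getD 0 0])).2
        = (route.drop p).take (n - p) := by
  intro n hn hlen
  induction n, hn using Nat.le_induction with
  | base =>
    refine ⟨0, by omega, ?_, ?_, ?_⟩
    · simp [PySem.List.pyRange_one_eq_nil]
    · simp [PySem.List.pyRange_one_eq_nil]
    · cases route with
      | nil => exact absurd rfl hne
      | cons x xs => simp [PySem.List.pyRange_one_eq_nil]
  | succ n hn ih =>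
    have hnlt : n < route.length := by omega
    obtain ⟨p, hp, h1, h2, h3⟩ := ih (by omega)
    have hcast : ((n + 1 : Nat) : Int) = (n : Int) + 1 := by push_cast; ring
    rw [hcast, PySem.List.pyRange_one_succ_right (by exact_mod_cast hn)]
    have hgd : route.getD n 0 = route[n]'hnlt := List.getD_eq_getElem route 0 hnlt
    have htake : ∀ q : Nat, q ≤ n →
        (route.drop q).take (n - q) ++ [route.getD n 0] = (route.drop q).take (n + 1 - q) := by
      intro q hq
      have hnq : n + 1 - q = (n - q) + 1 := by omega
      rw [hnq, List.take_add_one]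
      have hget : (route.drop q)[n - q]? = some (route[n]'hnlt) := by
        rw [List.getElem?_drop]
        have : q + (n - q) = n := by omega
        rw [this, List.getElem?_eq_getElem hnlt]
      simp [hget, List.getElem?_eq_getElem hnlt]
    by_cases hz : route.getD n 0 = 0
    · refine ⟨n, by omega, ?_, ?_, ?_⟩
      · simp only [List.foldl_append, List.filter_append, List.filter_cons, List.filter_nil,
          List.foldl_cons, List.foldl_nil, tripStepA,
          PySem.List.pyGetD_natCast, hz]
        simp only [beq_self_eq_true, if_true, List.foldl_cons, List.foldl_nil, tripStepB]
        rw [h1, h2, h3]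
        congr 2
        have hslice : PySem.List.slice route (some (p : Int)) (some ((n : Int) + 1))
            = (route.drop p).take (n + 1 - p) := by
          have : ((n : Int) + 1) = ((n + 1 : Nat) : Int) := by push_cast; ring
          rw [this, PySem.List.slice_natCast]
        rw [hslice, ← htake p (by omega), hz]
      · simp only [List.filter_append, List.filter_cons, List.filter_nil,
          PySem.List.pyGetD_natCast, hz]
        simp [tripStepB]
      · simp only [List.foldl_append, List.foldl_cons, List.foldl_nil, tripStepA,
          PySem.List.pyGetD_natCast, hz]
        rw [List.drop_eq_getElem_cons hnlt]
        have : n + 1 - n = 1 := by omega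
        rw [this, List.take_one]
        simp only [if_true, List.head?_cons, Option.toList_some]
        rw [← hgd, hz]
    · have hb : (route.getD n 0 == 0) = false := by simpa using hz
      refine ⟨p, by omega, ?_, ?_, ?_⟩
      · simp only [List.foldl_append, List.filter_append, List.filter_cons, List.filter_nil,
          PySem.List.pyGetD_natCast, hb, List.foldl_cons, List.foldl_nil]
        simp only [Bool.false_eq_true, if_false]
        simp only [tripStepA, PySem.List.pyGetD_natCast, if_neg hz]
        exact h1
      · simp only [List.filter_append, List.filter_cons, List.filter_nil,
          PySem.List.pyGetD_natCast, hb]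
        simp only [Bool.false_eq_true, if_false, List.append_nil]
        exact h2
      · simp only [List.foldl_append, List.foldl_cons, List.foldl_nil, tripStepA,
          PySem.List.pyGetD_natCast, if_neg hz]
        rw [h3, htake p (by omega)]

theorem trip_split_spec : Claim_equal_trip_split := by
  intro route _
  unfold Spec_trip_split trip_split trip_split_alt
  cases route with
  | nil => rfl
  | cons x xs =>
    obtain ⟨p, _, h1, _, _⟩ :=
      trip_split_inv (x :: xs) (by simp) (x :: xs).length (by simp) le_rfl
    simpa [PySem.List.pyGet?, PySem.List.pyIdx?] using h1
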